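-- pv_equiv track=rewrite | github.com/Krista/wikiToLatex | wikiprojekt/parser.py | convertItemize
-- ===== SOURCE A (Python) =====
-- def convertItemize(text):
--     lines = text.split("\n")
--     for i in range(len(lines)):
--         if lines[i].startswith("*"):
--             lines[i] = "\n\\begin{itemize} \n \item {" + lines[i][1:].strip() + "}"
--             i += 1
--             while i < len(lines) and lines[i].startswith("*"):
--                 lines[i] = "\n\item {" + lines[i][1:].strip() + "}"
--                 i += 1
--             lines[i-1] += " \n\\end{itemize}\n"
--     #treba najst prvy vyskyt a potom while kym to plati
--     return '\n'.join(lines)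
-- ===== SOURCE B (Python) =====
-- def convertItemize(text):
--     result = []
--     in_block = False
--     for line in text.split("\n"):
--         if line.startswith("*"):
--             if in_block:
--                 result.append("\n\item {" + line[1:].strip() + "}")
--             else:
--                 result.append("\n\\begin{itemize} \n \item {" + line[1:].strip() + "}")
--                 in_block = True
--         else:
--             if in_block:
--                 result[-1] += " \n\\end{itemize}\n"
--                 in_block = False
--             result.append(line)
--     if in_block:
--         result[-1] += " \n\\end{itemize}\n"
--     return '\n'.join(result)
-- ===== Notes on version B (the rewrite author's own statement) =====
-- stated objective: simpler
-- what changed: Replaces A's index-driven for-loop with a nested rewriting while-loop mutating the lines list in place by a single forward pass that builds a fresh result list with an in_block flag, closing an open itemize block when a non-star line (or the end of input) is reached.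
import Mathlib
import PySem

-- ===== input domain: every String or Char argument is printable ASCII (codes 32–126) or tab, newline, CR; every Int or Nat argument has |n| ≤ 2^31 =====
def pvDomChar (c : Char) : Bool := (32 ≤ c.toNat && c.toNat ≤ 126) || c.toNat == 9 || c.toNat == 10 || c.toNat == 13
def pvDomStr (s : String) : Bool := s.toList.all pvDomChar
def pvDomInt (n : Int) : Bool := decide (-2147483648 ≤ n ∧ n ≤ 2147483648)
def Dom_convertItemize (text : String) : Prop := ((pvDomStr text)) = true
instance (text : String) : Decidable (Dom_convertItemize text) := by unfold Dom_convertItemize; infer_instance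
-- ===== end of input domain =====

-- B replaces A's index loop with a nested in-place rewriting while-loop by a single
-- forward pass building a fresh list with an in_block flag (objective: simpler).

-- shared transliterations of the Python expressions both versions use:
-- line.startswith("*"), line[1:].strip(), and the three literal LaTeX strings
def pvStar (l : String) : Bool := PySem.Str.startswith l "*"
def pvItem (l : String) : String := PySem.Str.strip (PySem.Str.slice l (some 1) none)
def pvOpen (l : String) : String := "\n\\begin{itemize} \n \\item {" ++ pvItem l ++ "}"
def pvMid (l : String) : String := "\n\\item {" ++ pvItem l ++ "}"
def pvClose : String := " \n\\end{itemize}\n"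

-- text.split("\n"): the separator is non-empty, so split? never returns none
def pvSplit (text : String) : List String := (PySem.Str.split? text "\n").getD []

-- ===== PORT A =====
-- inner 'while i < len(lines) and lines[i].startswith("*")' (mutates lines, returns final i)
def pvAInner (n : Nat) (lines : List String) (i : Nat) : List String × Nat :=
  if h : i < n ∧ pvStar (lines.getD i "") = true then
    pvAInner n (lines.set i (pvMid (lines.getD i ""))) (i + 1)
  else
    (lines, i)
termination_by n - i
decreasing_by omega

-- body of the 'for i in range(len(lines))' loop
def pvAStep (n : Nat) (lines : List String) (i : Nat) : List String :=
  if pvStar (lines.getD i "") then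
    match pvAInner n (lines.set i (pvOpen (lines.getD i ""))) (i + 1) with
    | (lines2, j) => lines2.set (j - 1) (lines2.getD (j - 1) "" ++ pvClose)
  else
    lines

def pvAFor (n : Nat) (lines : List String) (i : Nat) : List String :=
  if i < n then pvAFor n (pvAStep n lines i) (i + 1) else lines
termination_by n - i
decreasing_by omega

def convertItemize (text : String) : String :=
  PySem.Str.join "\n" (pvAFor (pvSplit text).length (pvSplit text) 0)

-- ===== PORT B =====
-- result[-1] += s
def pvAppendLast (acc : List String) (s : String) : List String :=
  match acc with
  | [] => []
  | [x] => [x ++ s]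
  | x :: xs => x :: pvAppendLast xs s

-- loop body: state (result, in_block), one line
def pvBStep (st : List String × Bool) (line : String) : List String × Bool :=
  if pvStar line then
    if st.2 then (st.1 ++ [pvMid line], true)
    else (st.1 ++ [pvOpen line], true)
  else
    ((if st.2 then pvAppendLast st.1 pvClose else st.1) ++ [line], false)

def convertItemize_alt (text : String) : String :=
  match (pvSplit text).foldl pvBStep ([], false) with
  | (result, in_block) =>
    PySem.Str.join "\n" (if in_block then pvAppendLast result pvClose else result)

-- ===== PRECONDITION & SPEC =====
def Spec_convertItemize (text : String) (out : String) : Prop := out = convertItemize_alt text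
instance (text : String) (out : String) : Decidable (Spec_convertItemize text out) := by unfold Spec_convertItemize; infer_instance

-- ===== CLAIM (what is proved, stated in full; the proofs are below) =====
def Claim_equal_convertItemize : Prop := ∀ (text : String), Dom_convertItemize text → Spec_convertItemize text (convertItemize text)

-- ===== LEMMAS AND PROOFS =====

-- common specification: each maximal run of '*'-lines becomes
-- opener :: mids, with the closer appended to the run's last element
def pvSpec : List String → List String
  | [] => []
  | l :: rest =>
    if pvStar l then
      pvAppendLast (pvOpen l :: (rest.takeWhile pvStar).map pvMid) pvClose
        ++ pvSpec (rest.dropWhile pvStar)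
    else
      l :: pvSpec rest
termination_by ls => ls.length
decreasing_by
  all_goals simp [List.length_dropWhile_le]

-- rewritten lines start with '\n', so they never start with '*'
theorem pvStar_open_append (l t : String) : pvStar (pvOpen l ++ t) = false := by
  simp [pvStar, pvOpen, PySem.Chars.startswith, String.toList_append, List.isPrefixOf]

theorem pvStar_open (l : String) : pvStar (pvOpen l) = false := by
  simpa using pvStar_open_append l ""

theorem pvStar_mid_append (l t : String) : pvStar (pvMid l ++ t) = false := by
  simp [pvStar, pvMid, PySem.Chars.startswith, String.toList_append, List.isPrefixOf]

theorem pvStar_mid (l : String) : pvStar (pvMid l) = false := by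
  simpa using pvStar_mid_append l ""

theorem length_pvAppendLast (acc : List String) (s : String) :
    (pvAppendLast acc s).length = acc.length := by
  induction acc with
  | nil => simp [pvAppendLast]
  | cons x xs ih =>
    cases xs with
    | nil => simp [pvAppendLast]
    | cons y ys => simpa [pvAppendLast] using ih

theorem mem_pvAppendLast (acc : List String) (s x : String) (h : x ∈ pvAppendLast acc s) :
    x ∈ acc ∨ ∃ y ∈ acc, x = y ++ s := by
  induction acc with
  | nil => simp [pvAppendLast] at h
  | cons a as ih =>
    cases as with
    | nil =>
      simp [pvAppendLast] at h
      exact Or.inr ⟨a, by simp, h⟩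
    | cons b bs =>
      simp only [pvAppendLast, List.mem_cons] at h
      rcases h with h | h
      · exact Or.inl (by simp [h])
      · rcases ih h with h' | ⟨y, hy, hxy⟩
        · exact Or.inl (List.mem_cons_of_mem _ h')
        · exact Or.inr ⟨y, List.mem_cons_of_mem _ hy, hxy⟩

theorem pvAppendLast_append (acc xs : List String) (s : String) (h : xs ≠ []) :
    pvAppendLast (acc ++ xs) s = acc ++ pvAppendLast xs s := by
  induction acc with
  | nil => simp
  | cons a as ih =>
    cases hx : as ++ xs with
    | nil => exact absurd (List.append_eq_nil_iff.mp hx).2 h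
    | cons b bs =>
      simp only [List.cons_append, pvAppendLast, hx]
      rw [← hx, ih]

-- list-surgery form of "lines[j-1] += closer" at the last position of the middle block
theorem set_last_block (xs : List String) (x : String) (c : String) :
    ∀ (pre rest : List String),
      (pre ++ (x :: xs) ++ rest).set (pre.length + xs.length)
        ((pre ++ (x :: xs) ++ rest).getD (pre.length + xs.length) "" ++ c)
      = pre ++ pvAppendLast (x :: xs) c ++ rest := by
  induction xs generalizing x with
  | nil =>
    intro pre rest
    have hget : (pre ++ [x] ++ rest).getD pre.length "" = x := by
      rw [List.append_assoc]
      simp [List.getD]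
    simp only [List.length_nil, Nat.add_zero, hget]
    rw [List.append_assoc, List.append_assoc]
    simp [pvAppendLast]
  | cons y ys ih =>
    intro pre rest
    have h1 : pre ++ (x :: y :: ys) ++ rest = (pre ++ [x]) ++ (y :: ys) ++ rest := by simp
    have h2 : pre.length + (y :: ys).length = (pre ++ [x]).length + ys.length := by
      simp; omega
    rw [h1, h2, ih y (pre ++ [x]) rest]
    have : pvAppendLast (x :: y :: ys) c = x :: pvAppendLast (y :: ys) c := by
      simp [pvAppendLast]
    simp [this]

-- the inner while loop rewrites exactly the '*'-run and stops after it
theorem pvAInner_eq (n : Nat) (run : List String)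
    (hrun : ∀ l ∈ run, pvStar l = true) :
    ∀ (pre rest : List String),
      n = pre.length + run.length + rest.length →
      (∀ x, rest.head? = some x → pvStar x = false) →
      pvAInner n (pre ++ run ++ rest) pre.length
        = (pre ++ run.map pvMid ++ rest, pre.length + run.length) := by
  induction run with
  | nil =>
    intro pre rest hn hrest
    rw [pvAInner, dif_neg]
    · simp
    · rintro ⟨h1, h2⟩
      rcases rest with _ | ⟨x, rs⟩
      · simp at hn; omega
      · have hx : pvStar x = false := hrest x rfl
        have hget : (pre ++ [] ++ x :: rs).getD pre.length "" = x := by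
          simp [List.getD]
        rw [hget, hx] at h2
        exact Bool.false_ne_true h2
  | cons r rs ih =>
    intro pre rest hn hrest
    have hr : pvStar r = true := hrun r (by simp)
    have hget : (pre ++ (r :: rs) ++ rest).getD pre.length "" = r := by
      rw [List.append_assoc]
      simp [List.getD]
    rw [pvAInner, dif_pos]
    · have hset : (pre ++ (r :: rs) ++ rest).set pre.length (pvMid ((pre ++ (r :: rs) ++ rest).getD pre.length "")) = (pre ++ [pvMid r]) ++ rs ++ rest := by
        rw [hget, List.append_assoc]
        simp
      rw [hset]
      have hlen : pre.length + 1 = (pre ++ [pvMid r]).length := by simp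
      rw [hlen, ih (fun l hl => hrun l (by simp [hl])) (pre ++ [pvMid r]) rest (by simp at hn ⊢; omega) hrest]
      simp
      omega
    · exact ⟨by simp at hn ⊢; omega, by rw [hget]; exact hr⟩

-- the outer for loop: processed prefix stays, suffix is rewritten to pvSpec
theorem pvAFor_eq (n : Nat) : ∀ (fuel i : Nat) (pre suf : List String),
    n = pre.length + suf.length →
    i ≤ pre.length →
    (∀ l ∈ pre.drop i, pvStar l = false) →
    n - i ≤ fuel →
    pvAFor n (pre ++ suf) i = pre ++ pvSpec suf := by
  intro fuel
  induction fuel with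
  | zero =>
    intro i pre suf hn hi hns hf
    have hni : ¬ i < n := by omega
    rw [pvAFor, if_neg hni]
    have hsuf : suf = [] := by
      have : suf.length = 0 := by omega
      exact List.eq_nil_of_length_eq_zero this
    subst hsuf; simp [pvSpec]
  | succ fuel ih =>
    intro i pre suf hn hi hns hf
    by_cases hin : i < n
    · rw [pvAFor, if_pos hin]
      by_cases hip : i < pre.length
      · -- still inside the already-processed prefix: the body does nothing
        have hdrop : pre.drop i = pre[i] :: pre.drop (i + 1) := List.drop_eq_getElem_cons hip
        have hstar : pvStar pre[i] = false :=
          hns _ (by rw [hdrop]; exact List.mem_cons.mpr (Or.inl rfl))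
        have hget : (pre ++ suf).getD i "" = pre[i] := by
          simp [List.getD, List.getElem?_append_left hip, List.getElem?_eq_getElem hip]
        have hstep : pvAStep n (pre ++ suf) i = pre ++ suf := by
          rw [pvAStep, hget, if_neg (by simp [hstar])]
        rw [hstep]
        exact ih (i + 1) pre suf hn (by omega)
          (fun l hl => hns l (by rw [hdrop]; exact List.mem_cons_of_mem _ hl)) (by omega)
      · -- i = pre.length: we are looking at the head of the unprocessed suffix
        have hip' : i = pre.length := by omega
        subst hip'
        rcases suf with _ | ⟨l, rest⟩
        · simp at hn; omega
        · have hget : (pre ++ l :: rest).getD pre.length "" = l := by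
            simp [List.getD]
          by_cases hl : pvStar l = true
          · -- a run starts here: open, rewrite the run, close at its last line
            have hsplit : rest = rest.takeWhile pvStar ++ rest.dropWhile pvStar :=
              (List.takeWhile_append_dropWhile).symm
            set run := rest.takeWhile pvStar with hrundef
            set rest2 := rest.dropWhile pvStar with hrest2def
            have hlensplit : rest.length = run.length + rest2.length := by
              conv_lhs => rw [hsplit]
              simp
            have hset1 : (pre ++ l :: rest).set pre.length (pvOpen l) = (pre ++ [pvOpen l]) ++ run ++ rest2 := by
              conv_lhs => rw [hsplit]
              simp
            have hrunstar : ∀ x ∈ run, pvStar x = true := fun x hx => List.mem_takeWhile_imp hx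
            have hrest2head : ∀ x, rest2.head? = some x → pvStar x = false := by
              intro x hx
              have h2 := List.head?_dropWhile_not pvStar rest
              rw [← hrest2def, hx] at h2
              simpa using h2
            have hlen2 : n = (pre ++ [pvOpen l]).length + run.length + rest2.length := by
              simp at hn ⊢
              omega
            have hinner := pvAInner_eq n run hrunstar (pre ++ [pvOpen l]) rest2 hlen2 hrest2head
            have hpl : (pre ++ [pvOpen l]).length = pre.length + 1 := by simp
            rw [hpl] at hinner
            have hstep : pvAStep n (pre ++ l :: rest) pre.length
                = pre ++ pvAppendLast (pvOpen l :: run.map pvMid) pvClose ++ rest2 := by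
              rw [pvAStep, hget, if_pos hl, hset1, hinner]
              have hj : pre.length + 1 + run.length - 1 = pre.length + (run.map pvMid).length := by
                simp only [List.length_map]; omega
              show (pre ++ [pvOpen l] ++ List.map pvMid run ++ rest2).set (pre.length + 1 + run.length - 1)
                  ((pre ++ [pvOpen l] ++ List.map pvMid run ++ rest2).getD (pre.length + 1 + run.length - 1) "" ++ pvClose)
                = pre ++ pvAppendLast (pvOpen l :: run.map pvMid) pvClose ++ rest2
              have hform : pre ++ [pvOpen l] ++ List.map pvMid run ++ rest2
                  = pre ++ (pvOpen l :: List.map pvMid run) ++ rest2 := by simp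
              rw [hj, hform, set_last_block (run.map pvMid) (pvOpen l) pvClose pre rest2]
            rw [hstep]
            -- recurse with the fully processed run as part of the prefix
            set blockC := pvAppendLast (pvOpen l :: run.map pvMid) pvClose with hblockC
            have hlenblockC : blockC.length = run.length + 1 := by
              rw [hblockC, length_pvAppendLast]; simp
            have hns' : ∀ x ∈ (pre ++ blockC).drop (pre.length + 1), pvStar x = false := by
              intro x hx
              have hdropeq : (pre ++ blockC).drop (pre.length + 1) = blockC.drop 1 := by
                exact List.drop_length_add_append (l₁ := pre) (l₂ := blockC) 1
              rw [hdropeq] at hx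
              have hx' : x ∈ blockC := List.mem_of_mem_drop hx
              rw [hblockC] at hx'
              rcases mem_pvAppendLast _ _ _ hx' with h | ⟨y, hy, hxy⟩
              · rcases List.mem_cons.mp h with h | h
                · subst h; exact pvStar_open l
                · rcases List.mem_map.mp h with ⟨z, _, hz⟩
                  subst hz; exact pvStar_mid z
              · rcases List.mem_cons.mp hy with h | h
                · subst h; subst hxy; exact pvStar_open_append l _
                · rcases List.mem_map.mp h with ⟨z, _, hz⟩
                  subst hz; subst hxy; exact pvStar_mid_append z _
            have hn' : n = (pre ++ blockC).length + rest2.length := by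
              simp [hlenblockC] at hn ⊢
              omega
            have hrec := ih (pre.length + 1) (pre ++ blockC) rest2 hn'
              (by simp [hlenblockC]) hns' (by omega)
            rw [hrec]
            rw [pvSpec, if_pos hl, ← hrundef, ← hrest2def, ← hblockC]
            simp
          · -- not a run: the line is kept as is
            have hl' : pvStar l = false := by simpa using hl
            have hstep : pvAStep n (pre ++ l :: rest) pre.length = pre ++ l :: rest := by
              rw [pvAStep, hget, if_neg (by simp [hl'])]
            rw [hstep]
            have hrec := ih (pre.length + 1) (pre ++ [l]) rest (by simp at hn ⊢; omega)
              (by simp) (by simp) (by omega)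
            rw [show pre ++ l :: rest = pre ++ [l] ++ rest by simp, hrec]
            rw [pvSpec, if_neg (by simp [hl'])]
            simp
    · rw [pvAFor, if_neg hin]
      have hsuf : suf = [] := by
        have : suf.length = 0 := by omega
        exact List.eq_nil_of_length_eq_zero this
      subst hsuf; simp [pvSpec]

def pvFinish (st : List String × Bool) : List String :=
  if st.2 then pvAppendLast st.1 pvClose else st.1

-- B's single pass computes pvSpec, for either value of the in_block flag
theorem pvB_eq (ls : List String) :
    (∀ acc, pvFinish (ls.foldl pvBStep (acc, false)) = acc ++ pvSpec ls) ∧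
    (∀ acc, pvFinish (ls.foldl pvBStep (acc, true))
      = pvAppendLast (acc ++ (ls.takeWhile pvStar).map pvMid) pvClose
        ++ pvSpec (ls.dropWhile pvStar)) := by
  induction ls with
  | nil => simp [pvFinish, pvSpec]
  | cons l rest ih =>
    constructor
    · intro acc
      by_cases hl : pvStar l = true
      · rw [List.foldl_cons]
        have hb : pvBStep (acc, false) l = (acc ++ [pvOpen l], true) := by
          simp [pvBStep, hl]
        rw [hb, ih.2]
        rw [pvSpec, if_pos hl]
        have hform : acc ++ [pvOpen l] ++ List.map pvMid (rest.takeWhile pvStar)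
            = acc ++ (pvOpen l :: List.map pvMid (rest.takeWhile pvStar)) := by simp
        rw [hform, pvAppendLast_append acc _ pvClose (by simp)]
        simp
      · have hl' : pvStar l = false := by simpa using hl
        rw [List.foldl_cons]
        have hb : pvBStep (acc, false) l = (acc ++ [l], false) := by
          simp [pvBStep, hl']
        rw [hb, ih.1]
        rw [pvSpec, if_neg (by simp [hl'])]
        simp
    · intro acc
      by_cases hl : pvStar l = true
      · rw [List.foldl_cons]
        have hb : pvBStep (acc, true) l = (acc ++ [pvMid l], true) := by
          simp [pvBStep, hl]
        rw [hb, ih.2]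
        rw [List.takeWhile_cons_of_pos hl, List.dropWhile_cons_of_pos hl]
        simp
      · have hl' : pvStar l = false := by simpa using hl
        rw [List.foldl_cons]
        have hb : pvBStep (acc, true) l = (pvAppendLast acc pvClose ++ [l], false) := by
          simp [pvBStep, hl']
        rw [hb, ih.1]
        rw [List.takeWhile_cons_of_neg (by simp [hl']), List.dropWhile_cons_of_neg (by simp [hl'])]
        rw [pvSpec, if_neg (by simp [hl'])]
        simp

theorem convertItemize_eq_spec (text : String) :
    convertItemize text = PySem.Str.join "\n" (pvSpec (pvSplit text)) := by
  unfold convertItemize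
  congr 1
  have := pvAFor_eq (pvSplit text).length (pvSplit text).length 0 [] (pvSplit text)
    (by simp) (by simp) (by simp) (by omega)
  simpa using this

theorem convertItemize_alt_eq_spec (text : String) :
    convertItemize_alt text = PySem.Str.join "\n" (pvSpec (pvSplit text)) := by
  unfold convertItemize_alt
  have h := (pvB_eq (pvSplit text)).1 []
  rcases hst : (pvSplit text).foldl pvBStep ([], false) with ⟨result, in_block⟩
  rw [hst] at h
  simp only [pvFinish] at h
  simp only [h]
  simp

-- ===== VERDICT (by name: the statement is the Claim_ definition above) =====
theorem convertItemize_spec : Claim_equal_convertItemize := by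
  unfold Claim_equal_convertItemize
  intro text _
  unfold Spec_convertItemize
  rw [convertItemize_eq_spec, convertItemize_alt_eq_spec]
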